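-- pv_equiv track=rewrite | github.com/U6A-idk/mahjong-bot | test.py | eye
-- ===== SOURCE A (Python) =====
-- def eye(hand):
--     hand.sort()
--     Eyes = []
--     Temp_hand = hand.copy()
--     for tile in hand:
--         count = Temp_hand.count(tile)
--         if count >= 2 and tile not in Eyes:
--             Eyes.append(tile)
--             for i in range(2):
--                 Temp_hand.remove(tile)
--     return Eyes
-- ===== SOURCE B (Python) =====
-- def eye(hand):
--     hand.sort()
--     Eyes = []
--     for prev, cur in zip(hand, hand[1:]):
--         if prev == cur and (not Eyes or Eyes[-1] != cur):
--             Eyes.append(cur)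
--     return Eyes
-- ===== Notes on version B (the rewrite author's own statement) =====
-- stated objective: faster
-- what changed: Replaces the count-and-remove repeated scanning over a copied hand (count/remove each rescan the list) with a single adjacency pass over the sorted hand that appends a tile when it equals its predecessor and differs from the last emitted tile.
import Mathlib
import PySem

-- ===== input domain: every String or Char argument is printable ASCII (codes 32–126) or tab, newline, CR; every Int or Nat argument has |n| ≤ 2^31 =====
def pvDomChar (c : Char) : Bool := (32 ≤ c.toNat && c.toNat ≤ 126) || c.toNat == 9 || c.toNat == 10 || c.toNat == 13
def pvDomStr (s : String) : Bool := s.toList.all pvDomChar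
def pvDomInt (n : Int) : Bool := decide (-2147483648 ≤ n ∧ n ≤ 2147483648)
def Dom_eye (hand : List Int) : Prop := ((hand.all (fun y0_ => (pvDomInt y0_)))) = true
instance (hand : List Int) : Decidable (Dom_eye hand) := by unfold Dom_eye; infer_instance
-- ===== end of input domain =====

-- B replaces A's quadratic count-and-remove scanning with one linear adjacency pass over the sorted hand (objective: faster; measured).
-- Both A and B sort `hand` in place; the equivalence proved here is about the return value.

-- ===== PORT A =====
-- A's loop body: count in Temp_hand, then append + `for i in range(2): Temp_hand.remove(tile)`
-- (remove? = none would be Python's ValueError, unreachable since count ≥ 2; getD totalizes that branch)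
def eyeStep (st : List Int × List Int) (tile : Int) : List Int × List Int :=
  let Eyes := st.1
  let Temp := st.2
  let count := PySem.List.count Temp tile
  if 2 ≤ count ∧ tile ∉ Eyes then
    let T1 := (PySem.List.remove? Temp tile).getD Temp
    let T2 := (PySem.List.remove? T1 tile).getD T1
    (Eyes ++ [tile], T2)
  else (Eyes, Temp)

def eye (hand : List Int) : List Int :=
  let hand := PySem.List.sorted hand (fun x => x) false
  (hand.foldl eyeStep ([], hand)).1

-- ===== PORT B =====
-- B's loop body: `if prev == cur and (not Eyes or Eyes[-1] != cur): Eyes.append(cur)`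
def eyeAltStep (Eyes : List Int) (p : Int × Int) : List Int :=
  if p.1 = p.2 ∧ (Eyes = [] ∨ PySem.List.pyGet? Eyes (-1) ≠ some p.2) then Eyes ++ [p.2] else Eyes

-- `zip(hand, hand[1:])`, then one fold of the adjacency test
def eye_alt (hand : List Int) : List Int :=
  let hand := PySem.List.sorted hand (fun x => x) false
  (hand.zip (PySem.List.slice hand (some 1) none)).foldl eyeAltStep []

-- ===== PRECONDITION & SPEC =====
def Spec_eye (hand : List Int) (out : List Int) : Prop := out = eye_alt hand
instance (hand : List Int) (out : List Int) : Decidable (Spec_eye hand out) := by unfold Spec_eye; infer_instance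

-- ===== CLAIM (what is proved, stated in full; the proofs are below) =====
def Claim_equal_eye : Prop := ∀ (hand : List Int), Dom_eye hand → Spec_eye hand (eye hand)

-- ===== LEMMAS AND PROOFS =====

def stepA (c : Int → Nat) (E : List Int) (t : Int) : List Int :=
  if 2 ≤ c t ∧ t ∉ E then E ++ [t] else E

theorem eye_collapse (s : List Int) :
    ∀ (l E T : List Int),
      (∀ t : Int, T.count t + (if t ∈ E then 2 else 0) = s.count t) →
      (l.foldl eyeStep (E, T)).1 = l.foldl (stepA s.count) E := by
  intro l
  induction l with
  | nil => intro E T _; simp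
  | cons t rest ih =>
    intro E T h
    by_cases hc : 2 ≤ s.count t ∧ t ∉ E
    · have hE : t ∉ E := hc.2
      have hcnt : T.count t = s.count t := by have := h t; simp [hE] at this; omega
      have hm1 : t ∈ T := List.count_pos_iff.mp (by omega)
      have hr1 : PySem.List.remove? T t = some (T.erase t) :=
        PySem.List.remove?_eq_some_erase T t hm1
      have hcnt1 : (T.erase t).count t = T.count t - 1 := List.count_erase_self ..
      have hm2 : t ∈ T.erase t := List.count_pos_iff.mp (by omega)
      have hr2 : PySem.List.remove? (T.erase t) t = some ((T.erase t).erase t) :=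
        PySem.List.remove?_eq_some_erase (T.erase t) t hm2
      have hstep : eyeStep (E, T) t = (E ++ [t], (T.erase t).erase t) := by
        simp only [eyeStep, PySem.List.count_eq]
        rw [if_pos (by exact ⟨by omega, hE⟩)]
        simp [hr1, hr2]
      have hstepA : stepA s.count E t = E ++ [t] := by
        simp only [stepA]; rw [if_pos hc]
      rw [List.foldl_cons, List.foldl_cons, hstep, hstepA]
      apply ih
      intro u
      by_cases hu : u = t
      · subst hu
        have : ((T.erase u).erase u).count u = T.count u - 2 := by
          rw [List.count_erase_self, List.count_erase_self]; omega
        simp only [List.mem_append, List.mem_singleton, or_true, if_pos, this]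
        omega
      · have : ((T.erase t).erase t).count u = T.count u := by
          rw [List.count_erase_of_ne hu, List.count_erase_of_ne hu]
        have hmem : (u ∈ E ++ [t]) ↔ u ∈ E := by simp [hu]
        rw [this]
        simp only [hmem]
        exact h u
    · have hstep : eyeStep (E, T) t = (E, T) := by
        simp only [eyeStep, PySem.List.count_eq]
        rw [if_neg]
        rintro ⟨h1, h2⟩
        exact hc ⟨by have := h t; simp [h2] at this; omega, h2⟩
      have hstepA : stepA s.count E t = E := by simp only [stepA]; rw [if_neg hc]
      rw [List.foldl_cons, List.foldl_cons, hstep, hstepA]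
      exact ih E T h

theorem mem_foldl_stepA (c : Int → Nat) :
    ∀ (l E : List Int) (x : Int),
      x ∈ l.foldl (stepA c) E ↔ x ∈ E ∨ (x ∈ l ∧ 2 ≤ c x) := by
  intro l
  induction l with
  | nil => intro E x; simp
  | cons t rest ih =>
    intro E x
    rw [List.foldl_cons, ih]
    by_cases hx : x = t
    · subst hx
      unfold stepA
      split_ifs with hc
      · simp [hc.1]
      · simp only [List.mem_cons, true_or, true_and]
        constructor
        · rintro (h | h) ; exact Or.inl h; exact Or.inr h.2
        · rintro (h | h)
          · exact Or.inl h
          · rcases Classical.em (x ∈ E) with hE | hE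
            · exact Or.inl hE
            · exact absurd ⟨h, hE⟩ hc
    · have : x ∈ stepA c E t ↔ x ∈ E := by
        unfold stepA; split_ifs <;> simp [hx]
      rw [this]
      simp [List.mem_cons, hx]

theorem pairwise_foldl_stepA (c : Int → Nat) :
    ∀ (l E : List Int), l.Pairwise (· ≤ ·) → E.Pairwise (· < ·) →
      (∀ e ∈ E, ∀ y ∈ l, e ≤ y) → (l.foldl (stepA c) E).Pairwise (· < ·)
  | [], E, _, hE, _ => by simpa using hE
  | a :: rest, E, hl, hE, hb => by
    rw [List.foldl_cons]
    rcases List.pairwise_cons.mp hl with ⟨ht, hrest⟩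
    have hE' : (stepA c E a).Pairwise (· < ·) := by
      unfold stepA
      split_ifs with hc
      · rw [List.pairwise_append]
        refine ⟨hE, by simp, ?_⟩
        intro e he y hy
        have hy' : y = a := by simpa using hy
        have h1 : e ≤ a := hb e he a (List.mem_cons_self ..)
        have h2 : e ≠ a := fun h => hc.2 (h ▸ he)
        omega
      · exact hE
    have hb' : ∀ e ∈ stepA c E a, ∀ y ∈ rest, e ≤ y := by
      intro e he y hy
      unfold stepA at he
      split_ifs at he with hc
      · rcases List.mem_append.mp he with h | h
        · exact hb e h y (List.mem_cons_of_mem _ hy)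
        · simp only [List.mem_singleton] at h; subst h
          exact ht y hy
      · exact hb e he y (List.mem_cons_of_mem _ hy)
    exact pairwise_foldl_stepA c rest (stepA c E a) hrest hE' hb'

theorem zip_tail_pairwise :
    ∀ (s : List Int), s.Pairwise (· ≤ ·) →
      (s.zip s.tail).Pairwise (fun p q => p.2 ≤ q.2)
  | [], _ => by simp
  | [a], _ => by simp
  | a :: b :: t, h => by
    rcases List.pairwise_cons.mp h with ⟨ha, hbt⟩
    have ih := zip_tail_pairwise (b :: t) hbt
    simp only [List.tail_cons, List.zip_cons_cons]
    refine List.pairwise_cons.mpr ⟨?_, ih⟩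
    intro q hq
    have := (List.of_mem_zip hq).2
    rcases List.pairwise_cons.mp hbt with ⟨hb, _⟩
    exact hb q.2 this

theorem mem_zip_tail_count :
    ∀ (s : List Int) (x : Int), (x, x) ∈ s.zip s.tail → 2 ≤ s.count x
  | [], x, h => by simp at h
  | [a], x, h => by simp at h
  | a :: b :: t, x, h => by
    simp only [List.tail_cons, List.zip_cons_cons, List.mem_cons] at h
    rcases h with h | h
    · simp only [Prod.mk.injEq] at h
      obtain ⟨h1, h2⟩ := h
      subst h1; subst h2
      simp [List.count_cons]
    · have := mem_zip_tail_count (b :: t) x h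
      have h2 : (b :: t).count x ≤ (a :: b :: t).count x := by
        simp [List.count_cons]
      omega

theorem count_mem_zip_tail :
    ∀ (s : List Int), s.Pairwise (· ≤ ·) → ∀ (x : Int), 2 ≤ s.count x →
      (x, x) ∈ s.zip s.tail
  | [], _, x, h => by simp at h
  | a :: rest, hp, x, h => by
    rcases List.pairwise_cons.mp hp with ⟨ha, hrest⟩
    by_cases hax : a = x
    · subst hax
      have hmem : a ∈ rest := by
        rw [List.count_cons_self] at h
        exact List.count_pos_iff.mp (by omega)
      obtain ⟨b, t, rfl⟩ : ∃ b t, rest = b :: t := by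
        cases rest with
        | nil => simp at hmem
        | cons b t => exact ⟨b, t, rfl⟩
      have hab : a ≤ b := ha b (by simp)
      have hba : b = a := by
        rcases List.mem_cons.mp hmem with h | h
        · omega
        · rcases List.pairwise_cons.mp hrest with ⟨hb, _⟩
          have := hb a h
          omega
      subst hba
      simp
    · have h2 : 2 ≤ rest.count x := by
        simp [List.count_cons, hax] at h ⊢
        simpa [Ne.symm hax] using h
      have := count_mem_zip_tail rest hrest x h2
      obtain ⟨b, t, rfl⟩ : ∃ b t, rest = b :: t := by
        cases rest with
        | nil => simp at h2
        | cons b t => exact ⟨b, t, rfl⟩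
      simp only [List.tail_cons, List.zip_cons_cons, List.mem_cons]
      right
      simpa using this



theorem mem_foldl_stepB_mono :
    ∀ (P : List (Int × Int)) (E : List Int) (x : Int),
      x ∈ E → x ∈ P.foldl eyeAltStep E
  | [], E, x, h => h
  | p :: rest, E, x, h => by
    rw [List.foldl_cons]
    apply mem_foldl_stepB_mono rest
    unfold eyeAltStep
    split_ifs
    · exact List.mem_append_left _ h
    · exact h

theorem mem_foldl_stepB :
    ∀ (P : List (Int × Int)) (E : List Int) (x : Int),
      x ∈ P.foldl eyeAltStep E ↔ x ∈ E ∨ (x, x) ∈ P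
  | [], E, x => by simp
  | p :: rest, E, x => by
    obtain ⟨p1, p2⟩ := p
    rw [List.foldl_cons, mem_foldl_stepB rest]
    have key : x ∈ eyeAltStep E (p1, p2) ↔ x ∈ E ∨ (x, x) = (p1, p2) := by
      unfold eyeAltStep
      rw [PySem.List.pyGet?_neg_one]
      split_ifs with hc
      · obtain ⟨hc1, _⟩ := hc
        simp only [List.mem_append, List.mem_singleton, Prod.mk.injEq]
        constructor
        · rintro (h | h)
          · exact Or.inl h
          · exact Or.inr ⟨by omega, h⟩
        · rintro (h | ⟨h1, h2⟩)
          · exact Or.inl h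
          · exact Or.inr h2
      · push_neg at hc
        simp only [Prod.mk.injEq]
        constructor
        · exact Or.inl
        · rintro (h | ⟨h1, h2⟩)
          · exact h
          · have hp12 : p1 = p2 := by omega
            obtain ⟨hne, hlast⟩ := hc hp12
            rw [← h2] at hlast
            exact List.mem_of_getLast? hlast
    rw [key, List.mem_cons, or_assoc]

theorem le_getLast_of_pairwise_lt :
    ∀ (E : List Int) (e m : Int), E.Pairwise (· < ·) → e ∈ E → E.getLast? = some m → e ≤ m
  | [], _, _, _, he, _ => absurd he (by simp)
  | [a], e, m, _, he, hm => by
    simp at he hm; omega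
  | a :: b :: t, e, m, hp, he, hm => by
    rcases List.pairwise_cons.mp hp with ⟨ha, hbt⟩
    have hm' : (b :: t).getLast? = some m := by simpa using hm
    rcases List.mem_cons.mp he with h | h
    · subst h
      have hmmem : m ∈ b :: t := List.mem_of_getLast? hm'
      have := ha m hmmem
      omega
    · exact le_getLast_of_pairwise_lt (b :: t) e m hbt h hm'

theorem pairwise_foldl_stepB :
    ∀ (P : List (Int × Int)) (E : List Int),
      P.Pairwise (fun p q => p.2 ≤ q.2) → E.Pairwise (· < ·) →
      (∀ e ∈ E, ∀ q ∈ P, e ≤ q.2) → (P.foldl eyeAltStep E).Pairwise (· < ·)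
  | [], E, _, hE, _ => by simpa using hE
  | p :: rest, E, hP, hE, hb => by
    rw [List.foldl_cons]
    rcases List.pairwise_cons.mp hP with ⟨hp, hrest⟩
    have hE' : (eyeAltStep E p).Pairwise (· < ·) := by
      unfold eyeAltStep
      rw [PySem.List.pyGet?_neg_one]
      split_ifs with hc
      · rw [List.pairwise_append]
        refine ⟨hE, by simp, ?_⟩
        intro e he y hy
        have hy' : y = p.2 := by simpa using hy
        have hne : E ≠ [] := List.ne_nil_of_mem he
        have hlast : E.getLast? = some (E.getLast hne) := List.getLast?_eq_getLast hne
        have h1 : e ≤ E.getLast hne := le_getLast_of_pairwise_lt E e _ hE he hlast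
        have h2 : E.getLast hne ≤ p.2 :=
          hb (E.getLast hne) (List.getLast_mem hne) p (List.mem_cons_self ..)
        have h3 : E.getLast hne ≠ p.2 := by
          rcases hc.2 with h | h
          · exact absurd h hne
          · intro hh; exact h (by rw [hlast, hh])
        omega
      · exact hE
    have hb' : ∀ e ∈ eyeAltStep E p, ∀ q ∈ rest, e ≤ q.2 := by
      intro e he q hq
      unfold eyeAltStep at he
      split_ifs at he with hc
      · rcases List.mem_append.mp he with h | h
        · exact hb e h q (List.mem_cons_of_mem _ hq)
        · have : e = p.2 := by simpa using h
          rw [this]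
          exact hp q hq
      · exact hb e he q (List.mem_cons_of_mem _ hq)
    exact pairwise_foldl_stepB rest (eyeAltStep E p) hrest hE' hb'

theorem eq_of_pairwise_lt_of_mem_iff :
    ∀ (l1 l2 : List Int), l1.Pairwise (· < ·) → l2.Pairwise (· < ·) →
      (∀ x, x ∈ l1 ↔ x ∈ l2) → l1 = l2
  | [], l2, _, _, hmem => by
    symm
    rw [List.eq_nil_iff_forall_not_mem]
    intro x hx
    exact (by simpa using (hmem x).mpr hx : False)
  | a :: t1, l2, h1, h2, hmem => by
    obtain ⟨b, t2, rfl⟩ : ∃ b t2, l2 = b :: t2 := by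
      cases l2 with
      | nil => exact absurd ((hmem a).mp (List.mem_cons_self ..)) (by simp)
      | cons b t2 => exact ⟨b, t2, rfl⟩
    rcases List.pairwise_cons.mp h1 with ⟨ha, ht1⟩
    rcases List.pairwise_cons.mp h2 with ⟨hbl, ht2⟩
    have hab : a = b := by
      rcases List.mem_cons.mp ((hmem a).mp (List.mem_cons_self ..)) with h | h
      · exact h
      · rcases List.mem_cons.mp ((hmem b).mpr (List.mem_cons_self ..)) with h' | h'
        · omega
        · have := hbl a h
          have := ha b h'
          omega
    subst hab
    have : t1 = t2 := by
      apply eq_of_pairwise_lt_of_mem_iff t1 t2 ht1 ht2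
      intro x
      constructor
      · intro hx
        have hxa : a < x := ha x hx
        rcases List.mem_cons.mp ((hmem x).mp (List.mem_cons_of_mem _ hx)) with h | h
        · omega
        · exact h
      · intro hx
        have hxa : a < x := hbl x hx
        rcases List.mem_cons.mp ((hmem x).mpr (List.mem_cons_of_mem _ hx)) with h | h
        · omega
        · exact h
    rw [this]

-- ===== VERDICT (by name: the statement is the Claim_ definition above) =====
theorem eye_spec : Claim_equal_eye := by
  intro hand _
  unfold Spec_eye
  have hs : (PySem.List.sorted hand (fun x => x) false).Pairwise (· ≤ ·) := by
    simpa using PySem.List.sorted_pairwise (xs := hand) (key := fun x => x)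
  set s := PySem.List.sorted hand (fun x => x) false with hsdef
  have hA : eye hand = s.foldl (stepA s.count) [] := by
    have := eye_collapse s s [] s (by intro t; simp)
    simpa [eye, ← hsdef] using this
  have hB : eye_alt hand = (s.zip s.tail).foldl eyeAltStep [] := by
    simp [eye_alt, PySem.List.slice_from_one, ← hsdef]
  rw [hA, hB]
  apply eq_of_pairwise_lt_of_mem_iff
  · exact pairwise_foldl_stepA _ s [] hs (by simp) (by simp)
  · exact pairwise_foldl_stepB (s.zip s.tail) [] (zip_tail_pairwise s hs) (by simp) (by simp)
  intro x
  rw [mem_foldl_stepA, mem_foldl_stepB]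
  simp only [List.not_mem_nil, false_or]
  constructor
  · rintro ⟨_, hcnt⟩
    exact count_mem_zip_tail s hs x hcnt
  · intro h
    have hcnt := mem_zip_tail_count s x h
    exact ⟨List.count_pos_iff.mp (by omega), hcnt⟩
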